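-- pv_equiv track=rewrite | github.com/PavelPatsey/AoC2024-Python | 12/12.py | get_plots_dfs
-- ===== SOURCE A (Python) =====
-- from collections import defaultdict
--
-- DIRS4 = (
--     (0, -1),
--     (0, 1),
--     (-1, 0),
--     (1, 0),
-- )
--
-- def in_grid(r, c, grid):
--     rows = len(grid)
--     cols = len(grid[0])
--     return 0 <= r < rows and 0 <= c < cols
--
-- def get_plots_dfs(grid):
--     plots = defaultdict(set)
--     visited = set()
--
--     def dfs(i, j, i0, j0, label):
--         if not in_grid(i, j, grid):
--             return
--         if (i, j) in plots[(i0, j0)]: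
--             return
--         if grid[i][j] != label:
--             return
--
--         plots[(i0, j0)].add((i, j))
--
--         for dir in DIRS4:
--             di, dj = dir
--             dfs(i + di, j + dj, i0, j0, label)
--
--     rows = len(grid)
--     cols = len(grid[0])
--     for r in range(rows):
--         for c in range(cols):
--             if (r, c) not in visited:
--                 dfs(r, c, r, c, grid[r][c])
--                 visited.update(plots[(r, c)])
--
--     return plots
-- ===== SOURCE B (Python) =====
-- from collections import defaultdict
--
-- DIRS4 = (
--     (0, -1),
--     (0, 1),
--     (-1, 0),
--     (1, 0),
-- )
--
-- def get_plots_dfs(grid):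
--     rows = len(grid)
--     cols = len(grid[0])
--     plots = defaultdict(set)
--     visited = set()
--     for r in range(rows):
--         for c in range(cols):
--             if (r, c) in visited:
--                 continue
--             label = grid[r][c]
--             comp = plots[(r, c)]
--             stack = [(r, c)]
--             while stack:
--                 i, j = stack.pop()
--                 if not (0 <= i < rows and 0 <= j < cols):
--                     continue
--                 if (i, j) in comp:
--                     continue
--                 if grid[i][j] != label:
--                     continue
--                 comp.add((i, j))
--                 for di, dj in reversed(DIRS4):
--                     stack.append((i + di, j + dj))
--             visited |= comp
--     return plots
-- ===== Notes on version B (the rewrite author's own statement) =====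
-- stated objective: alternative
-- what changed: A's nested recursive dfs helper (one call per neighbour, Python recursion stack) is replaced by an in-line iterative flood fill with an explicit stack: pop a cell, run the same three checks, push its four neighbours in reversed DIRS4 order; visit order and all returned sets/keys are identical.
import Mathlib
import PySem

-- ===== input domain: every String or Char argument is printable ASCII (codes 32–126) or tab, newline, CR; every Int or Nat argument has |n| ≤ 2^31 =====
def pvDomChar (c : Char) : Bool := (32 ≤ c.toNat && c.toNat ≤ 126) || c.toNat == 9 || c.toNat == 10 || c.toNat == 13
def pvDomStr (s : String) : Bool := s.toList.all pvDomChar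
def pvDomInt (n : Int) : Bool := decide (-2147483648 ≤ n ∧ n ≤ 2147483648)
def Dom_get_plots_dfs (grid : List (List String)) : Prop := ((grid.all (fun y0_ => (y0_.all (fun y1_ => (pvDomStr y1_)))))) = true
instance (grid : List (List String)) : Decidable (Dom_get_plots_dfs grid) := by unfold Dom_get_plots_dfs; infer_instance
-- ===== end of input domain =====

-- B replaces A's recursive dfs helper by an in-line flood fill with an explicit stack
-- (same visit order: neighbours pushed in reversed DIRS4 order, checks done at pop time); objective: alternative.

-- ===== PORT A =====
-- DIRS4 module constant
def pvDIRS4 : List (Int × Int) := [(0, -1), (0, 1), (-1, 0), (1, 0)]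

-- in_grid(r, c, grid); '(grid.headD [])' is grid[0], exact on Pre_ (grid nonempty)
def pvInGrid (i j : Int) (grid : List (List String)) : Bool :=
  decide (0 ≤ i ∧ i < (grid.length : Int)) && decide (0 ≤ j ∧ j < ((grid.headD []).length : Int))

-- grid[i][j]; exact whenever it is reached (only after pvInGrid holds, so indices are nonnegative and in range on Pre_)
def pvCell (grid : List (List String)) (i j : Int) : String :=
  PySem.List.pyGetD (PySem.List.pyGetD grid i []) j ""

-- the inner recursive dfs, threading the one dict entry plots[(i0,j0)] it touches.
-- fuel is a recursion-depth bound only: every nested call has added a fresh cell first,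
-- so depth ≤ rows*cols+1 and the fuel passed by get_plots_dfs is never exhausted.
def dfsA (grid : List (List String)) (label : String) : Nat → Int → Int → PySem.Set (Int × Int) → PySem.Set (Int × Int)
  | 0, _, _, s => s
  | fuel + 1, i, j, s =>
    if pvInGrid i j grid = false then s
    else if PySem.Set.contains s (i, j) then s
    else if pvCell grid i j ≠ label then s
    else
      pvDIRS4.foldl (fun t d => dfsA grid label fuel (i + d.1) (j + d.2) t) (PySem.Set.add s (i, j))

def get_plots_dfs (grid : List (List String)) : List (Int × Int × List (Int × Int)) :=
  let rows := grid.length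
  let cols := (grid.headD []).length
  let fuel := rows * cols + 1
  let st := (List.range rows).foldl (fun st r =>
      (List.range cols).foldl (fun st c =>
        let rc : Int × Int := (Int.ofNat r, Int.ofNat c)
        if PySem.Set.contains st.2 rc then st
        else
          -- dfs(r, c, r, c, grid[r][c]) starting from the defaultdict entry plots[(r,c)], then visited.update(plots[(r,c)])
          let comp := dfsA grid (pvCell grid rc.1 rc.2) fuel rc.1 rc.2 (PySem.Dict.getD st.1 rc [])
          (PySem.Dict.insert st.1 rc comp, PySem.Set.update st.2 comp)) st)
    ((PySem.Dict.empty : PySem.Dict (Int × Int) (List (Int × Int))), ([] : PySem.Set (Int × Int)))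
  st.1.items.map (fun p => (p.1.1, p.1.2, p.2))

-- ===== PORT B =====
-- all in-grid cells, and the number of them not yet in a set: the termination measure of B's while loop
def pvCells (grid : List (List String)) : List (Int × Int) :=
  (List.range grid.length).flatMap (fun r =>
    (List.range (grid.headD []).length).map (fun c => (Int.ofNat r, Int.ofNat c)))

def pvFree (grid : List (List String)) (s : PySem.Set (Int × Int)) : Nat :=
  ((pvCells grid).filter (fun x => !PySem.Set.contains s x)).length

theorem pv_length_filter_le {α : Type} {p q : α → Bool} (himp : ∀ a, p a = true → q a = true) :
    ∀ (l : List α), (l.filter p).length ≤ (l.filter q).length := by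
  intro l
  induction l with
  | nil => simp
  | cons a t ih =>
    by_cases hp : p a = true
    · simp only [List.filter_cons, hp, himp a hp, if_true, List.length_cons]
      omega
    · by_cases hq : q a = true <;> simp [hp, hq] <;> omega

theorem pv_length_filter_lt {α : Type} {p q : α → Bool} (himp : ∀ a, p a = true → q a = true)
    {x : α} (hqx : q x = true) (hpx : p x = false) :
    ∀ (l : List α), x ∈ l → (l.filter p).length < (l.filter q).length := by
  intro l
  induction l with
  | nil => simp
  | cons a t ih =>
    intro hx
    rcases List.mem_cons.mp hx with rfl | hx
    · have := pv_length_filter_le himp t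
      simp only [List.filter_cons, hqx, if_true, hpx, Bool.false_eq_true, if_false, List.length_cons]
      omega
    · have := ih hx
      by_cases hp : p a = true
      · simp only [List.filter_cons, hp, himp a hp, if_true, List.length_cons]
        omega
      · by_cases hq : q a = true <;> simp [hp, hq] <;> omega

theorem pvFree_add_lt (grid : List (List String)) (s : PySem.Set (Int × Int)) (i j : Int)
    (hin : pvInGrid i j grid = true) (hc : PySem.Set.contains s (i, j) = false) :
    pvFree grid (PySem.Set.add s (i, j)) < pvFree grid s := by
  simp only [pvInGrid, Bool.and_eq_true, decide_eq_true_eq] at hin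
  have hadd : PySem.Set.add s (i, j) = s ++ [(i, j)] := by
    unfold PySem.Set.add
    rw [hc]
    rfl
  have h1 : i.toNat < grid.length := by omega
  have h2 : j.toNat < (grid.headD []).length := by omega
  have hmem : (i, j) ∈ pvCells grid := by
    unfold pvCells
    refine List.mem_flatMap.mpr ⟨i.toNat, List.mem_range.mpr h1,
      List.mem_map.mpr ⟨j.toNat, List.mem_range.mpr h2, ?_⟩⟩
    simp only [Int.ofNat_eq_natCast]
    rw [Int.toNat_of_nonneg hin.1.1, Int.toNat_of_nonneg hin.2.1]
  have himp : ∀ a : Int × Int, (!PySem.Set.contains (PySem.Set.add s (i, j)) a) = true →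
      (!PySem.Set.contains s a) = true := by
    intro a ha
    rw [hadd] at ha
    simp only [Bool.not_eq_true'] at ha ⊢
    simp only [PySem.Set.contains, List.contains_eq_mem, List.mem_append, decide_eq_false_iff_not] at ha ⊢
    exact fun h => ha (Or.inl h)
  have hqx : (!PySem.Set.contains s (i, j)) = true := by
    rw [Bool.not_eq_true']
    exact hc
  have hpx : (!PySem.Set.contains (PySem.Set.add s (i, j)) (i, j)) = false := by
    rw [hadd]
    simp [PySem.Set.contains, List.contains_eq_mem]
  exact pv_length_filter_lt himp hqx hpx _ hmem

-- B's while loop: pop (head of the list = top of the stack), run the three checks,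
-- add the cell and push its four neighbours in reversed DIRS4 order.
def loopB (grid : List (List String)) (label : String) : List (Int × Int) → PySem.Set (Int × Int) → PySem.Set (Int × Int)
  | [], comp => comp
  | (i, j) :: stack, comp =>
    if pvInGrid i j grid = false then loopB grid label stack comp
    else if PySem.Set.contains comp (i, j) then loopB grid label stack comp
    else if pvCell grid i j ≠ label then loopB grid label stack comp
    else loopB grid label (pvDIRS4.reverse.foldl (fun st d => (i + d.1, j + d.2) :: st) stack)
           (PySem.Set.add comp (i, j))
termination_by stack comp => 5 * pvFree grid comp + stack.length
decreasing_by
  · simp only [List.length_cons]; omega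
  · simp only [List.length_cons]; omega
  · simp only [List.length_cons]; omega
  · rename_i hin hc _
    have h := pvFree_add_lt grid comp i j
      (by revert hin; cases pvInGrid i j grid <;> simp)
      (by revert hc; cases PySem.Set.contains comp (i, j) <;> simp)
    simp only [pvDIRS4, List.reverse_cons, List.reverse_nil, List.nil_append, List.cons_append,
      List.foldl_cons, List.foldl_nil, List.length_cons]
    omega

def get_plots_dfs_alt (grid : List (List String)) : List (Int × Int × List (Int × Int)) :=
  let rows := grid.length
  let cols := (grid.headD []).length
  let st := (List.range rows).foldl (fun st r =>
      (List.range cols).foldl (fun st c =>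
        let rc : Int × Int := (Int.ofNat r, Int.ofNat c)
        if PySem.Set.contains st.2 rc then st
        else
          let label := pvCell grid rc.1 rc.2
          let comp := loopB grid label [rc] (PySem.Dict.getD st.1 rc [])
          (PySem.Dict.insert st.1 rc comp, PySem.Set.union st.2 comp)) st)
    ((PySem.Dict.empty : PySem.Dict (Int × Int) (List (Int × Int))), ([] : PySem.Set (Int × Int)))
  st.1.items.map (fun p => (p.1.1, p.1.2, p.2))

-- ===== PRECONDITION & SPEC =====
-- Pre_ excludes exactly the grids where Python A raises IndexError: the empty grid (len(grid[0]))
-- and ragged grids where some row is shorter than row 0 (grid[i][j] inside dfs).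
def Pre_get_plots_dfs (grid : List (List String)) : Prop :=
  grid ≠ [] ∧ ∀ row ∈ grid, (grid.headD []).length ≤ row.length

instance (grid : List (List String)) : Decidable (Pre_get_plots_dfs grid) := by
  unfold Pre_get_plots_dfs; infer_instance

def pvWitness_get_plots_dfs : List (List String) := [["A", "B"], ["A", "A"]]

def Spec_get_plots_dfs (grid : List (List String)) (out : List (Int × Int × List (Int × Int))) : Prop := out = get_plots_dfs_alt grid
instance (grid : List (List String)) (out : List (Int × Int × List (Int × Int))) : Decidable (Spec_get_plots_dfs grid out) := by unfold Spec_get_plots_dfs; infer_instance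

-- ===== CLAIM (what is proved, stated in full; the proofs are below) =====
def Claim_equal_get_plots_dfs : Prop := ∀ (grid : List (List String)), Dom_get_plots_dfs grid → Pre_get_plots_dfs grid → Spec_get_plots_dfs grid (get_plots_dfs grid)

-- ===== LEMMAS AND PROOFS =====

theorem pv_prefix_add {s : PySem.Set (Int × Int)} (x : Int × Int) : s <+: PySem.Set.add s x := by
  unfold PySem.Set.add
  split
  · exact List.prefix_refl s
  · exact ⟨[x], rfl⟩

theorem pv_foldl_prefix {β : Type} (f : PySem.Set (Int × Int) → β → PySem.Set (Int × Int))
    (h : ∀ t d, t <+: f t d) :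
    ∀ (l : List β) (s : PySem.Set (Int × Int)), s <+: l.foldl f s := by
  intro l
  induction l with
  | nil => intro s; exact List.prefix_refl s
  | cons a t ih => intro s; exact (h s a).trans (ih (f s a))

theorem dfsA_prefix (grid : List (List String)) (label : String) :
    ∀ (fuel : Nat) (i j : Int) (s : PySem.Set (Int × Int)), s <+: dfsA grid label fuel i j s := by
  intro fuel
  induction fuel with
  | zero => intro i j s; exact List.prefix_refl s
  | succ f ih =>
    intro i j s
    rw [dfsA]
    split
    · exact List.prefix_refl s
    split
    · exact List.prefix_refl s
    split
    · exact List.prefix_refl s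
    exact (pv_prefix_add (i, j)).trans
      (pv_foldl_prefix _ (fun t d => ih (i + d.1) (j + d.2) t) pvDIRS4 _)

theorem pvFree_mono (grid : List (List String)) {s t : PySem.Set (Int × Int)} (h : s <+: t) :
    pvFree grid t ≤ pvFree grid s := by
  apply pv_length_filter_le
  intro a ha
  simp only [Bool.not_eq_true', PySem.Set.contains, List.contains_eq_mem,
    decide_eq_false_iff_not] at ha ⊢
  exact fun hm => ha (h.subset hm)

theorem loopB_nil (grid : List (List String)) (label : String) (s : PySem.Set (Int × Int)) :
    loopB grid label [] s = s := by
  rw [loopB]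

theorem loopB_cons (grid : List (List String)) (label : String) (i j : Int)
    (st : List (Int × Int)) (s : PySem.Set (Int × Int)) :
    loopB grid label ((i, j) :: st) s =
      if pvInGrid i j grid = false then loopB grid label st s
      else if PySem.Set.contains s (i, j) = true then loopB grid label st s
      else if pvCell grid i j ≠ label then loopB grid label st s
      else loopB grid label
        ((i + 0, j + -1) :: (i + 0, j + 1) :: (i + -1, j + 0) :: (i + 1, j + 0) :: st)
        (PySem.Set.add s (i, j)) := by
  rw [loopB]
  simp only [pvDIRS4, List.reverse_cons, List.reverse_nil, List.nil_append, List.cons_append,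
    List.foldl_cons, List.foldl_nil]

theorem loopB_append (grid : List (List String)) (label : String) :
    ∀ (l1 : List (Int × Int)) (s : PySem.Set (Int × Int)) (l2 : List (Int × Int)),
      loopB grid label (l1 ++ l2) s = loopB grid label l2 (loopB grid label l1 s) := by
  intro l1 s
  induction l1, s using loopB.induct grid label with
  | case1 s => intro l2; rw [List.nil_append, loopB_nil]
  | case2 i j stack s hin ih =>
    intro l2
    rw [List.cons_append, loopB_cons, if_pos hin, loopB_cons, if_pos hin]
    exact ih l2
  | case3 i j stack s hin hc ih =>
    intro l2
    rw [List.cons_append, loopB_cons, if_neg hin, if_pos hc, loopB_cons, if_neg hin, if_pos hc]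
    exact ih l2
  | case4 i j stack s hin hc hl ih =>
    intro l2
    rw [List.cons_append, loopB_cons, if_neg hin, if_neg hc, if_pos hl,
      loopB_cons, if_neg hin, if_neg hc, if_pos hl]
    exact ih l2
  | case5 i j stack s hin hc hl ih =>
    intro l2
    rw [List.cons_append, loopB_cons, if_neg hin, if_neg hc, if_neg hl,
      loopB_cons (st := stack), if_neg hin, if_neg hc, if_neg hl]
    simp only [pvDIRS4, List.reverse_cons, List.reverse_nil, List.nil_append, List.cons_append,
      List.foldl_cons, List.foldl_nil] at ih
    exact ih l2

theorem dfsA_succ (grid : List (List String)) (label : String) (f : Nat) (i j : Int)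
    (s : PySem.Set (Int × Int)) :
    dfsA grid label (f + 1) i j s =
      if pvInGrid i j grid = false then s
      else if PySem.Set.contains s (i, j) = true then s
      else if pvCell grid i j ≠ label then s
      else dfsA grid label f (i + 1) (j + 0)
             (dfsA grid label f (i + -1) (j + 0)
               (dfsA grid label f (i + 0) (j + 1)
                 (dfsA grid label f (i + 0) (j + -1) (PySem.Set.add s (i, j))))) := by
  rw [dfsA]
  simp only [pvDIRS4, List.foldl_cons, List.foldl_nil]

theorem dfsA_eq_loopB (grid : List (List String)) (label : String) :
    ∀ (fuel : Nat) (i j : Int) (s : PySem.Set (Int × Int)), pvFree grid s < fuel →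
      dfsA grid label fuel i j s = loopB grid label [(i, j)] s := by
  intro fuel
  induction fuel with
  | zero => intro i j s h; omega
  | succ f ih =>
    intro i j s h
    rw [dfsA_succ, loopB_cons]
    by_cases hin : pvInGrid i j grid = false
    · rw [if_pos hin, if_pos hin, loopB_nil]
    rw [if_neg hin, if_neg hin]
    by_cases hc : PySem.Set.contains s (i, j) = true
    · rw [if_pos hc, if_pos hc, loopB_nil]
    rw [if_neg hc, if_neg hc]
    by_cases hl : pvCell grid i j ≠ label
    · rw [if_pos hl, if_pos hl, loopB_nil]
    rw [if_neg hl, if_neg hl]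
    have hlt := pvFree_add_lt grid s i j
      (by revert hin; cases pvInGrid i j grid <;> simp)
      (by revert hc; cases PySem.Set.contains s (i, j) <;> simp)
    set s1 := PySem.Set.add s (i, j) with hs1
    have h1 : pvFree grid s1 < f := by omega
    have e1 := ih (i + 0) (j + -1) s1 h1
    set t1 := dfsA grid label f (i + 0) (j + -1) s1 with ht1
    have p1 : pvFree grid t1 < f :=
      lt_of_le_of_lt (pvFree_mono grid (dfsA_prefix grid label f _ _ s1)) h1
    have e2 := ih (i + 0) (j + 1) t1 p1
    set t2 := dfsA grid label f (i + 0) (j + 1) t1 with ht2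
    have p2 : pvFree grid t2 < f :=
      lt_of_le_of_lt (pvFree_mono grid (dfsA_prefix grid label f _ _ t1)) p1
    have e3 := ih (i + -1) (j + 0) t2 p2
    set t3 := dfsA grid label f (i + -1) (j + 0) t2 with ht3
    have p3 : pvFree grid t3 < f :=
      lt_of_le_of_lt (pvFree_mono grid (dfsA_prefix grid label f _ _ t2)) p2
    have e4 := ih (i + 1) (j + 0) t3 p3
    rw [show ((i + 0, j + -1) :: (i + 0, j + 1) :: (i + -1, j + 0) :: (i + 1, j + 0) ::
        ([] : List (Int × Int))) =
        [(i + 0, j + -1)] ++ [(i + 0, j + 1)] ++ [(i + -1, j + 0)] ++ [(i + 1, j + 0)] from rfl,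
      loopB_append, loopB_append, loopB_append, ← e1, ← e2, ← e3, ← e4]

theorem pvFree_le (grid : List (List String)) (s : PySem.Set (Int × Int)) :
    pvFree grid s ≤ grid.length * (grid.headD []).length := by
  have h1 : pvFree grid s ≤ (pvCells grid).length := List.length_filter_le _ _
  have h2 : (pvCells grid).length = grid.length * (grid.headD []).length := by
    simp [pvCells, List.length_flatMap]
  omega

theorem get_plots_dfs_spec : Claim_equal_get_plots_dfs := by
  intro grid _ _
  unfold Spec_get_plots_dfs
  have hb : ∀ (label : String) (i j : Int) (s0 : PySem.Set (Int × Int)),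
      dfsA grid label (grid.length * (grid.headD []).length + 1) i j s0 =
        loopB grid label [(i, j)] s0 :=
    fun label i j s0 => dfsA_eq_loopB grid label _ i j s0 (by have := pvFree_le grid s0; omega)
  simp only [get_plots_dfs, get_plots_dfs_alt, PySem.Set.union, hb]
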